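-- pv_equiv track=rewrite | github.com/cirosantilli/project-euler-solutions | solvers/749.py | _build_k_bounds
-- ===== SOURCE A (Python) =====
-- def _build_k_bounds(
--     max_digits: int, max_k: int, p10: list[int]
-- ) -> tuple[list[list[int]], list[list[list[int]]]]:
--     """
--     For length L and max digit m (>=2):
--
--       t(k) = sum(c_d * d^k)
--
--     We use coarse bounds:
--       c_m * m^k <= t(k) <= L * m^k
--
--     Since n is L digits, n ~ t(k), so we only need k where t(k) could have the right magnitude:
--       10^(L-1)-1 <= t(k) <= 10^L
--
--     Precompute:
--       k_low[L][m]  = smallest k with L*m^k >= 10^(L-1)-1  (otherwise t(k) is too small)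
--       k_high[L][m][c] = largest k with c*m^k <= 10^L      (otherwise t(k) is too large)
--     """
--     low_t = [0] * (max_digits + 1)
--     high_t = [0] * (max_digits + 1)
--     for L in range(1, max_digits + 1):
--         low_t[L] = p10[L - 1] - 1
--         high_t[L] = p10[L]
--
--     k_low = [[max_k + 1] * 10 for _ in range(max_digits + 1)]
--     k_high = [
--         [[0] * (max_digits + 1) for _ in range(10)] for __ in range(max_digits + 1)
--     ]
--
--     for L in range(1, max_digits + 1):
--         lt = low_t[L]
--         ht = high_t[L]
--         for m in range(2, 10):
--             # k_low depends only on (L,m)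
--             p = m
--             k = 1
--             while k <= max_k and L * p < lt:
--                 p *= m
--                 k += 1
--             k_low[L][m] = k
--
--             # k_high depends on (L,m,c_m)
--             for c in range(1, L + 1):
--                 p = m
--                 best = 0
--                 for kk in range(1, max_k + 1):
--                     if c * p <= ht:
--                         best = kk
--                         p *= m
--                     else:
--                         break
--                 k_high[L][m][c] = best
--
--     return k_low, k_high
-- ===== SOURCE B (Python) =====
-- def _bisect_left(a, x):
--     # hand-written bisect_left (A's module imports nothing, so no bisect import)
--     lo, hi = 0, len(a)
--     while lo < hi:
--         mid = (lo + hi) // 2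
--         if a[mid] < x:
--             lo = mid + 1
--         else:
--             hi = mid
--     return lo
--
--
-- def _bisect_right(a, x):
--     lo, hi = 0, len(a)
--     while lo < hi:
--         mid = (lo + hi) // 2
--         if a[mid] <= x:
--             lo = mid + 1
--         else:
--             hi = mid
--     return lo
--
--
-- def _build_k_bounds(
--     max_digits: int, max_k: int, p10: list[int]
-- ) -> tuple[list[list[int]], list[list[list[int]]]]:
--     # Per m, the power ladder m, m^2, ... is computed once, truncated at the largest
--     # bound any (L, c) can ask about; each cell is then a binary search in that
--     # ladder, and the tables are built by comprehensions.
--     G = 1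
--     for L in range(1, max_digits + 1):
--         if p10[L - 1] - 1 > G:
--             G = p10[L - 1] - 1
--         if p10[L] > G:
--             G = p10[L]
--
--     pws = []
--     for m in range(2, 10):
--         pw = []
--         p = m
--         k = 1
--         while k <= max_k and p <= G:
--             pw.append(p)
--             p *= m
--             k += 1
--         pws.append(pw)
--
--     k_low = [
--         [max_k + 1] * 10
--         if L == 0
--         else [max_k + 1, max_k + 1]
--         + [
--             _bisect_left(pws[m - 2], -((-(p10[L - 1] - 1)) // L)) + 1
--             for m in range(2, 10)
--         ]
--         for L in range(max_digits + 1)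
--     ]
--     k_high = [
--         [[0] * (max_digits + 1) for _ in range(10)]
--         if L == 0
--         else [[0] * (max_digits + 1)] * 2
--         + [
--             [0]
--             + [_bisect_right(pws[m - 2], p10[L] // c) for c in range(1, L + 1)]
--             + [0] * (max_digits - L)
--             for m in range(2, 10)
--         ]
--         for L in range(max_digits + 1)
--     ]
--     return k_low, k_high
-- ===== Notes on version B (the rewrite author's own statement) =====
-- stated objective: alternative
-- what changed: Instead of re-multiplying a fresh power chain per (L,m) and per (L,m,c) cell, B precomputes one truncated power ladder per digit m and answers each k_low/k_high cell by a binary search in that ladder (largest k with m^k <= ht//c, resp. first k with m^k >= ceil(lt/L)), building the result tables by comprehensions instead of in-place index assignment.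
import Mathlib
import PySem

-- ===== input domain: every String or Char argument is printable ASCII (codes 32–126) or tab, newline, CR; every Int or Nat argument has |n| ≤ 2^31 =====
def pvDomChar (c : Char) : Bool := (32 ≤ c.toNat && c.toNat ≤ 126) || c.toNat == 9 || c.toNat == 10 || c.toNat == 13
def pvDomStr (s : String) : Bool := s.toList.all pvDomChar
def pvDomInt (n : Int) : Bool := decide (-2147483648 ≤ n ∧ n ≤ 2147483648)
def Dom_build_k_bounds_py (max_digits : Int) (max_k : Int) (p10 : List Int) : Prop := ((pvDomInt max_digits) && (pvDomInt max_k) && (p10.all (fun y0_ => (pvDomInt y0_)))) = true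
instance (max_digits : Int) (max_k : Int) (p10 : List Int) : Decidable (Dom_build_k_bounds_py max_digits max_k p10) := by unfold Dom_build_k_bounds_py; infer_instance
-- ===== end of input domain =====

-- B replaces A's per-cell power-multiplication loops by one per-digit power ladder
-- (computed once, truncated at the largest relevant bound) plus a binary search per
-- cell, and builds the tables by comprehensions instead of in-place assignment.
-- Equivalence is claimed on Pre_ (A raises IndexError when p10 is shorter than
-- max_digits+1).

-- ===== PORT A =====

-- A's "while k <= max_k and L * p < lt: p *= m; k += 1" loop (fuel max_k.toNat suffices:
-- k starts at 1 and the guard k <= max_k bounds the number of iterations).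
def pvAKlow (L lt maxk m : Int) : Nat → Int → Int → Int
  | 0, _p, k => k
  | f+1, p, k => if k ≤ maxk ∧ L * p < lt then pvAKlow L lt maxk m f (p*m) (k+1) else k

-- A's "for kk in range(1, max_k+1): if c*p <= ht: best = kk; p *= m else: break" loop.
def pvABest (c ht maxk m : Int) : Nat → Int → Int → Int → Int
  | 0, _p, _kk, best => best
  | f+1, p, kk, best =>
      if kk ≤ maxk then
        (if c * p ≤ ht then pvABest c ht maxk m f (p*m) (kk+1) kk else best)
      else best

def build_k_bounds_py (max_digits : Int) (max_k : Int) (p10 : List Int) : List (List Int) × List (List (List Int)) :=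
  let lh := (PySem.List.pyRange 1 (max_digits+1) 1).foldl
    (fun (s : List Int × List Int) L =>
      (PySem.List.pySetD s.1 L (PySem.List.pyGetD p10 (L-1) 0 - 1),
       PySem.List.pySetD s.2 L (PySem.List.pyGetD p10 L 0)))
    (PySem.List.pyRepeat [0] (max_digits+1), PySem.List.pyRepeat [0] (max_digits+1))
  let k_low0 : List (List Int) :=
    (PySem.List.pyRange 0 (max_digits+1) 1).map (fun _ => PySem.List.pyRepeat [max_k+1] 10)
  let k_high0 : List (List (List Int)) :=
    (PySem.List.pyRange 0 (max_digits+1) 1).map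
      (fun _ => (PySem.List.pyRange 0 10 1).map (fun _ => PySem.List.pyRepeat [0] (max_digits+1)))
  (PySem.List.pyRange 1 (max_digits+1) 1).foldl
    (fun (s : List (List Int) × List (List (List Int))) L =>
      let lt := PySem.List.pyGetD lh.1 L 0
      let ht := PySem.List.pyGetD lh.2 L 0
      (PySem.List.pyRange 2 10 1).foldl
        (fun (s : List (List Int) × List (List (List Int))) m =>
          let kv := pvAKlow L lt max_k m max_k.toNat m 1
          let s1 := PySem.List.pySetD s.1 L
            (PySem.List.pySetD (PySem.List.pyGetD s.1 L []) m kv)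
          let s2 := (PySem.List.pyRange 1 (L+1) 1).foldl
            (fun kh c =>
              let best := pvABest c ht max_k m max_k.toNat m 1 0
              PySem.List.pySetD kh L
                (PySem.List.pySetD (PySem.List.pyGetD kh L []) m
                  (PySem.List.pySetD (PySem.List.pyGetD (PySem.List.pyGetD kh L []) m []) c best)))
            s.2
          (s1, s2))
        s)
    (k_low0, k_high0)

-- ===== PORT B =====

-- Source B's "while k <= max_k and p <= G: pw.append(p); p *= m; k += 1" ladder loop.
def pvBPw (maxk G m : Int) : Nat → Int → Int → List Int → List Int
  | 0, _p, _k, pw => pw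
  | f+1, p, k, pw => if k ≤ maxk ∧ p ≤ G then pvBPw maxk G m f (p*m) (k+1) (pw ++ [p]) else pw

-- Source B's hand-written _bisect_left/_bisect_right are the verbatim CPython bisect
-- loops; ported as PySem.List.bisectLeft / bisectRight (the same lo/hi halving loop).
def build_k_bounds_py_alt (max_digits : Int) (max_k : Int) (p10 : List Int) : List (List Int) × List (List (List Int)) :=
  let G := (PySem.List.pyRange 1 (max_digits+1) 1).foldl
    (fun g L =>
      let g1 := if PySem.List.pyGetD p10 (L-1) 0 - 1 > g then PySem.List.pyGetD p10 (L-1) 0 - 1 else g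
      if PySem.List.pyGetD p10 L 0 > g1 then PySem.List.pyGetD p10 L 0 else g1)
    1
  let pws := (PySem.List.pyRange 2 10 1).map (fun m => pvBPw max_k G m max_k.toNat m 1 [])
  let k_low := (PySem.List.pyRange 0 (max_digits+1) 1).map (fun L =>
    if L = 0 then PySem.List.pyRepeat [max_k+1] 10
    else [max_k+1, max_k+1] ++ (PySem.List.pyRange 2 10 1).map (fun m =>
      ((PySem.List.bisectLeft (PySem.List.pyGetD pws (m-2) [])
          (-(PySem.Int.floordiv (-(PySem.List.pyGetD p10 (L-1) 0 - 1)) L)) : Nat) : Int) + 1))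
  let k_high := (PySem.List.pyRange 0 (max_digits+1) 1).map (fun L =>
    if L = 0 then (PySem.List.pyRange 0 10 1).map (fun _ => PySem.List.pyRepeat [0] (max_digits+1))
    else PySem.List.pyRepeat [PySem.List.pyRepeat [0] (max_digits+1)] 2 ++
      (PySem.List.pyRange 2 10 1).map (fun m =>
        [0] ++ (PySem.List.pyRange 1 (L+1) 1).map (fun c =>
          ((PySem.List.bisectRight (PySem.List.pyGetD pws (m-2) [])
              (PySem.Int.floordiv (PySem.List.pyGetD p10 L 0) c) : Nat) : Int))
        ++ PySem.List.pyRepeat [0] (max_digits - L)))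
  (k_low, k_high)

-- ===== PRECONDITION & SPEC =====
-- A indexes p10[L] for L = 1..max_digits, so it raises IndexError iff
-- max_digits ≥ 1 and len(p10) ≤ max_digits; exactly those inputs are excluded.
def Pre_build_k_bounds_py (max_digits : Int) (max_k : Int) (p10 : List Int) : Prop :=
  1 ≤ max_digits → max_digits + 1 ≤ (p10.length : Int)
instance (max_digits : Int) (max_k : Int) (p10 : List Int) : Decidable (Pre_build_k_bounds_py max_digits max_k p10) := by unfold Pre_build_k_bounds_py; infer_instance
def pvWitness_build_k_bounds_py : Int × Int × List Int := (2, 3, [1, 10, 100])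

def Spec_build_k_bounds_py (max_digits : Int) (max_k : Int) (p10 : List Int) (out : List (List Int) × List (List (List Int))) : Prop := out = build_k_bounds_py_alt max_digits max_k p10
instance (max_digits : Int) (max_k : Int) (p10 : List Int) (out : List (List Int) × List (List (List Int))) : Decidable (Spec_build_k_bounds_py max_digits max_k p10 out) := by unfold Spec_build_k_bounds_py; infer_instance

-- ===== CLAIM (what is proved, stated in full; the proofs are below) =====
def Claim_equal_build_k_bounds_py : Prop := ∀ (max_digits : Int) (max_k : Int) (p10 : List Int), Dom_build_k_bounds_py max_digits max_k p10 → Pre_build_k_bounds_py max_digits max_k p10 → Spec_build_k_bounds_py max_digits max_k p10 (build_k_bounds_py max_digits max_k p10)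

-- ===== LEMMAS AND PROOFS =====

-- ---- abbreviations for the values both programs read off p10 ----
def pvLT (p10 : List Int) (L : Int) : Int := PySem.List.pyGetD p10 (L-1) 0 - 1
def pvHT (p10 : List Int) (L : Int) : Int := PySem.List.pyGetD p10 L 0
def pvGdef (md : Int) (p10 : List Int) : Int :=
  (PySem.List.pyRange 1 (md+1) 1).foldl
    (fun g L =>
      let g1 := if PySem.List.pyGetD p10 (L-1) 0 - 1 > g then PySem.List.pyGetD p10 (L-1) 0 - 1 else g
      if PySem.List.pyGetD p10 L 0 > g1 then PySem.List.pyGetD p10 L 0 else g1)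
    1
def pvLad (p m : Int) (t : Nat) : List Int := (List.range t).map (fun i => p * m ^ i)

-- ---- generic counting / bisect facts ----
lemma pv_countP_split (l : List Int) (p : Int → Bool) (n : Nat) (hn : n ≤ l.length)
    (h1 : ∀ (j : Nat) (hj : j < l.length), j < n → p l[j] = true)
    (h2 : ∀ (j : Nat) (hj : j < l.length), n ≤ j → p l[j] = false) :
    l.countP p = n := by
  have hsplit : l = l.take n ++ l.drop n := (List.take_append_drop n l).symm
  rw [hsplit, List.countP_append]
  have ht : (l.take n).countP p = (l.take n).length := by
    rw [List.countP_eq_length]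
    intro a ha
    obtain ⟨j, hj, rfl⟩ := List.mem_iff_getElem.mp ha
    simp only [List.getElem_take]
    exact h1 j (by simp at hj; omega) (by simp at hj; omega)
  have hd : (l.drop n).countP p = 0 := by
    rw [List.countP_eq_zero]
    intro a ha
    obtain ⟨j, hj, rfl⟩ := List.mem_iff_getElem.mp ha
    simp only [List.getElem_drop]
    simp [h2 (n+j) (by simp at hj; omega) (by omega)]
  rw [ht, hd, List.length_take]
  omega

lemma pv_bisectLeft_eq_countP (xs : List Int) (x : Int) (hs : xs.Pairwise (· ≤ ·)) :
    (PySem.List.bisectLeft xs x : Nat) = xs.countP (fun q => decide (q < x)) := by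
  obtain ⟨hle, h1, h2⟩ := PySem.List.bisectLeft_spec xs x hs
  exact (pv_countP_split xs _ _ hle (fun j hj hjn => by simp [h1 j hj hjn])
    (fun j hj hjn => by have := h2 j hj hjn; simp; omega)).symm

lemma pv_bisectRight_eq_countP (xs : List Int) (x : Int) (hs : xs.Pairwise (· ≤ ·)) :
    (PySem.List.bisectRight xs x : Nat) = xs.countP (fun q => decide (q ≤ x)) := by
  obtain ⟨hle, h1, h2⟩ := PySem.List.bisectRight_spec xs x hs
  exact (pv_countP_split xs _ _ hle (fun j hj hjn => by simp [h1 j hj hjn])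
    (fun j hj hjn => by have := h2 j hj hjn; simp; omega)).symm

lemma pv_countP_takeWhile (l : List Int) (hsort : l.Pairwise (· ≤ ·)) (cond : Int → Bool) (G : Int)
    (h : ∀ q ∈ l, cond q = true → q ≤ G) :
    (l.takeWhile (fun q => decide (q ≤ G))).countP cond = l.countP cond := by
  induction l with
  | nil => simp
  | cons x t ih =>
    by_cases hx : x ≤ G
    · rw [List.takeWhile_cons_of_pos (by simp [hx])]
      simp only [List.countP_cons]
      rw [ih (List.Pairwise.of_cons hsort) (fun q hq => h q (by simp [hq]))]
    · rw [List.takeWhile_cons_of_neg (by simp [hx])]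
      symm
      rw [show List.countP cond ([] : List Int) = 0 from rfl, List.countP_eq_zero]
      intro a ha
      have hxa : x ≤ a := by
        rcases List.mem_cons.mp ha with rfl | ha'
        · exact le_refl a
        · exact (List.pairwise_cons.mp hsort).1 a ha'
      by_contra hc
      have := h a ha hc
      omega

-- ---- ladder facts ----
lemma pvLad_zero (p m : Int) : pvLad p m 0 = [] := rfl

lemma pvLad_succ (p m : Int) (t : Nat) : pvLad p m (t+1) = p :: pvLad (p*m) m t := by
  unfold pvLad
  rw [List.range_succ_eq_map, List.map_cons, List.map_map]
  simp only [pow_zero, mul_one]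
  congr 1
  apply List.map_congr_left
  intro i _
  simp only [Function.comp_apply, pow_succ]
  ring

lemma pvLad_mem_ge (p m : Int) (t : Nat) (hp : 1 ≤ p) (hm : 1 ≤ m) :
    ∀ q ∈ pvLad p m t, p ≤ q := by
  intro q hq
  obtain ⟨i, _, rfl⟩ := List.mem_map.mp hq
  have : (1:Int) ≤ m ^ i := one_le_pow₀ hm
  nlinarith

lemma pvLad_pairwise (p m : Int) (t : Nat) (hp : 1 ≤ p) (hm : 1 ≤ m) :
    (pvLad p m t).Pairwise (· ≤ ·) := by
  unfold pvLad
  rw [List.pairwise_map]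
  apply List.Pairwise.imp_of_mem (l := List.range t) _ List.pairwise_lt_range
  intro i j _ _ hij
  have h1 : m ^ i ≤ m ^ j := pow_le_pow_right₀ hm (le_of_lt hij)
  nlinarith

-- ---- the three loops, characterized on the ladder ----
lemma pvAKlow_eq (L lt maxk m : Int) (hL : 1 ≤ L) (hm : 1 ≤ m) :
    ∀ (f t : Nat) (p k : Int), 1 ≤ p → k + t = maxk + 1 → t ≤ f →
    pvAKlow L lt maxk m f p k = k + ((pvLad p m t).countP (fun q => decide (L * q < lt)) : Int) := by
  intro f
  induction f with
  | zero =>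
    intro t p k hp ht hf
    interval_cases t
    simp [pvAKlow, pvLad_zero]
  | succ f ih =>
    intro t p k hp ht hf
    by_cases hcond : k ≤ maxk ∧ L * p < lt
    · have ht1 : 1 ≤ t := by omega
      obtain ⟨t', rfl⟩ : ∃ t', t = t' + 1 := ⟨t - 1, by omega⟩
      rw [show pvAKlow L lt maxk m (f+1) p k = pvAKlow L lt maxk m f (p*m) (k+1) from by
        simp [pvAKlow, hcond]]
      rw [ih t' (p*m) (k+1) (by nlinarith) (by omega) (by omega)]
      rw [pvLad_succ]
      rw [List.countP_cons]
      simp only [hcond.2, decide_true]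
      push_cast
      ring
    · rw [show pvAKlow L lt maxk m (f+1) p k = k from by simp [pvAKlow, hcond]]
      have hz : (pvLad p m t).countP (fun q => decide (L * q < lt)) = 0 := by
        rw [List.countP_eq_zero]
        intro q hq
        rcases not_and_or.mp hcond with hk | hlt
        · have ht0 : t = 0 := by omega
          rw [ht0, pvLad_zero] at hq
          simp at hq
        · have hpq := pvLad_mem_ge p m t hp hm q hq
          simp only [decide_eq_true_eq]
          push Not at hlt
          nlinarith
      simp [hz]

lemma pvABest_eq (c ht maxk m : Int) (hc : 1 ≤ c) (hm : 1 ≤ m) :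
    ∀ (f t : Nat) (p kk : Int), 1 ≤ p → kk + t = maxk + 1 → t ≤ f →
    pvABest c ht maxk m f p kk (kk-1) = (kk - 1) + ((pvLad p m t).countP (fun q => decide (c * q ≤ ht)) : Int) := by
  intro f
  induction f with
  | zero =>
    intro t p kk hp ht' hf
    interval_cases t
    simp [pvABest, pvLad_zero]
  | succ f ih =>
    intro t p kk hp ht' hf
    by_cases hkk : kk ≤ maxk
    · by_cases hle : c * p ≤ ht
      · obtain ⟨t', rfl⟩ : ∃ t', t = t' + 1 := ⟨t - 1, by omega⟩
        rw [show pvABest c ht maxk m (f+1) p kk (kk-1) = pvABest c ht maxk m f (p*m) (kk+1) kk from by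
          simp [pvABest, hkk, hle]]
        have := ih t' (p*m) (kk+1) (by nlinarith) (by omega) (by omega)
        rw [show (kk + 1 - 1 : Int) = kk from by ring] at this
        rw [this, pvLad_succ, List.countP_cons]
        simp only [hle, decide_true]
        push_cast
        ring
      · rw [show pvABest c ht maxk m (f+1) p kk (kk-1) = kk - 1 from by
          simp [pvABest, hkk, hle]]
        have hz : (pvLad p m t).countP (fun q => decide (c * q ≤ ht)) = 0 := by
          rw [List.countP_eq_zero]
          intro q hq
          have hpq := pvLad_mem_ge p m t hp hm q hq
          simp only [decide_eq_true_eq]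
          push Not at hle
          nlinarith
        simp [hz]
    · rw [show pvABest c ht maxk m (f+1) p kk (kk-1) = kk - 1 from by simp [pvABest, hkk]]
      have : t = 0 := by omega
      subst this
      simp [pvLad_zero]

lemma pvBPw_eq (maxk G m : Int) :
    ∀ (f t : Nat) (p k : Int) (pw : List Int), k + t = maxk + 1 → t ≤ f →
    pvBPw maxk G m f p k pw = pw ++ (pvLad p m t).takeWhile (fun q => decide (q ≤ G)) := by
  intro f
  induction f with
  | zero =>
    intro t p k pw ht hf
    interval_cases t
    simp [pvBPw, pvLad_zero]
  | succ f ih =>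
    intro t p k pw ht hf
    by_cases hcond : k ≤ maxk ∧ p ≤ G
    · obtain ⟨t', rfl⟩ : ∃ t', t = t' + 1 := ⟨t - 1, by omega⟩
      rw [show pvBPw maxk G m (f+1) p k pw = pvBPw maxk G m f (p*m) (k+1) (pw ++ [p]) from by
        simp [pvBPw, hcond]]
      rw [ih t' (p*m) (k+1) (pw ++ [p]) (by omega) (by omega)]
      rw [pvLad_succ, List.takeWhile_cons_of_pos (by simp [hcond.2])]
      simp
    · rw [show pvBPw maxk G m (f+1) p k pw = pw from by simp [pvBPw, hcond]]
      rcases not_and_or.mp hcond with hk | hG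
      · have : t = 0 := by omega
        subst this
        simp [pvLad_zero]
      · obtain ⟨t', rfl⟩ | rfl : (∃ t', t = t' + 1) ∨ t = 0 := by
          rcases t with _ | t'
          · exact Or.inr rfl
          · exact Or.inl ⟨t', rfl⟩
        · rw [pvLad_succ, List.takeWhile_cons_of_neg (by simpa using hG)]
          simp
        · simp [pvLad_zero]

-- ---- the two threshold translations ----
lemma pv_ceil_iff (L lt q : Int) (hL : 1 ≤ L) :
    q < -(PySem.Int.floordiv (-lt) L) ↔ L * q < lt := by
  have h := (PySem.Int.neg_floordiv_neg_eq_iff_of_pos (a := lt) (b := L)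
    (q := -(PySem.Int.floordiv (-lt) L)) (by omega)).mp rfl
  constructor
  · intro hq
    nlinarith [h.1, h.2]
  · intro hq
    nlinarith [h.1, h.2]

lemma pv_floor_iff (c ht q : Int) (hc : 1 ≤ c) :
    q ≤ PySem.Int.floordiv ht c ↔ c * q ≤ ht := by
  rw [PySem.Int.le_floordiv_iff_mul_le (by omega)]
  constructor <;> intro h <;> nlinarith

-- ---- per-cell equality: A's scan = B's bisect on the shared truncated ladder ----
lemma pv_cell_low (L lt maxk G m : Int) (hL : 1 ≤ L) (hm : 1 ≤ m) (hltG : lt ≤ G) :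
    pvAKlow L lt maxk m maxk.toNat m 1
      = ((PySem.List.bisectLeft (pvBPw maxk G m maxk.toNat m 1 [])
          (-(PySem.Int.floordiv (-lt) L)) : Nat) : Int) + 1 := by
  by_cases hk : 0 ≤ maxk
  case neg =>
    have h0 : maxk.toNat = 0 := by omega
    rw [h0]
    have hpw : pvBPw maxk G m 0 m 1 [] = [] := rfl
    rw [hpw]
    have : PySem.List.bisectLeft ([] : List Int) (-(PySem.Int.floordiv (-lt) L)) = 0 := by
      have h1 := (PySem.List.bisectLeft_spec ([] : List Int) (-(PySem.Int.floordiv (-lt) L)) (by simp)).1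
      simp only [List.length_nil, Nat.le_zero] at h1
      exact h1
    rw [this]
    simp [pvAKlow]
  case pos =>
    have hA := pvAKlow_eq L lt maxk m hL hm maxk.toNat maxk.toNat m 1 hm (by omega) (le_refl _)
    have hB := pvBPw_eq maxk G m maxk.toNat maxk.toNat m 1 [] (by omega) (le_refl _)
    rw [hA, hB]
    try simp only [List.nil_append]
    set lad := pvLad m m maxk.toNat with hlad
    have hsort : lad.Pairwise (· ≤ ·) := pvLad_pairwise m m maxk.toNat hm hm
    have hsort' : (lad.takeWhile (fun q => decide (q ≤ G))).Pairwise (· ≤ ·) :=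
      hsort.sublist (List.takeWhile_sublist _)
    rw [pv_bisectLeft_eq_countP _ _ hsort']
    have hcongr : ∀ l : List Int, (∀ q ∈ l, q ∈ lad) →
        l.countP (fun q => decide (q < -(PySem.Int.floordiv (-lt) L)))
          = l.countP (fun q => decide (L * q < lt)) := by
      intro l hmem
      apply List.countP_congr
      intro q hq
      simp only [decide_eq_true_eq]
      exact pv_ceil_iff L lt q hL
    rw [hcongr _ (fun q hq => (List.takeWhile_sublist _).mem hq)]
    rw [pv_countP_takeWhile lad hsort _ G]
    · omega
    · intro q hq hcond
      have hq1 : m ≤ q := pvLad_mem_ge m m maxk.toNat hm hm q hq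
      simp only [decide_eq_true_eq] at hcond
      nlinarith

lemma pv_cell_high (c ht maxk G m : Int) (hc : 1 ≤ c) (hm : 1 ≤ m) (hhtG : ht ≤ G) :
    pvABest c ht maxk m maxk.toNat m 1 0
      = ((PySem.List.bisectRight (pvBPw maxk G m maxk.toNat m 1 [])
          (PySem.Int.floordiv ht c) : Nat) : Int) := by
  by_cases hk : 0 ≤ maxk
  case neg =>
    have h0 : maxk.toNat = 0 := by omega
    rw [h0]
    have hpw : pvBPw maxk G m 0 m 1 [] = [] := rfl
    rw [hpw]
    have : PySem.List.bisectRight ([] : List Int) (PySem.Int.floordiv ht c) = 0 := by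
      have h1 := (PySem.List.bisectRight_spec ([] : List Int) (PySem.Int.floordiv ht c) (by simp)).1
      simp only [List.length_nil, Nat.le_zero] at h1
      exact h1
    rw [this]
    simp [pvABest]
  case pos =>
    have hA := pvABest_eq c ht maxk m hc hm maxk.toNat maxk.toNat m 1 hm (by omega) (le_refl _)
    rw [show (1:Int) - 1 = 0 from rfl] at hA
    rw [hA]
    have hB := pvBPw_eq maxk G m maxk.toNat maxk.toNat m 1 [] (by omega) (le_refl _)
    rw [hB]
    try simp only [List.nil_append]
    set lad := pvLad m m maxk.toNat with hlad
    have hsort : lad.Pairwise (· ≤ ·) := pvLad_pairwise m m maxk.toNat hm hm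
    have hsort' : (lad.takeWhile (fun q => decide (q ≤ G))).Pairwise (· ≤ ·) :=
      hsort.sublist (List.takeWhile_sublist _)
    rw [pv_bisectRight_eq_countP _ _ hsort']
    have hcongr : (lad.takeWhile (fun q => decide (q ≤ G))).countP
          (fun q => decide (q ≤ PySem.Int.floordiv ht c))
        = (lad.takeWhile (fun q => decide (q ≤ G))).countP (fun q => decide (c * q ≤ ht)) := by
      apply List.countP_congr
      intro q hq
      simp only [decide_eq_true_eq]
      exact pv_floor_iff c ht q hc
    rw [hcongr]
    rw [pv_countP_takeWhile lad hsort _ G]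
    · omega
    · intro q hq hcond
      have hq1 : m ≤ q := pvLad_mem_ge m m maxk.toNat hm hm q hq
      simp only [decide_eq_true_eq] at hcond
      nlinarith

-- ---- fold-shape lemmas for A's in-place updates ----
lemma pv_foldl_setD_at {α β : Type} (i : Int) (hi0 : 0 ≤ i) (xs : List β) (T : β → α → α)
    (d0 : α) :
    ∀ (acc : List α), i < (acc.length : Int) →
    xs.foldl (fun a x => PySem.List.pySetD a i (T x (PySem.List.pyGetD a i d0))) acc
      = PySem.List.pySetD acc i (xs.foldl (fun r x => T x r) (PySem.List.pyGetD acc i d0)) := by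
  induction xs with
  | nil =>
    intro acc hi
    simp only [List.foldl_nil]
    rw [PySem.List.pySetD_of_nonneg _ _ hi0, PySem.List.pyGetD_eq_getElem _ _ hi0 hi]
    exact (List.set_getElem_self (by omega)).symm
  | cons x xs ih =>
    intro acc hi
    simp only [List.foldl_cons]
    rw [ih (PySem.List.pySetD acc i (T x (PySem.List.pyGetD acc i d0)))
      (by rw [PySem.List.length_pySetD]; exact hi)]
    simp only [PySem.List.pySetD_of_nonneg _ _ hi0]
    have hv : PySem.List.pyGetD (acc.set i.toNat (T x (PySem.List.pyGetD acc i d0))) i d0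
        = T x (PySem.List.pyGetD acc i d0) := by
      rw [PySem.List.pyGetD_eq_getElem _ _ hi0 (by rw [List.length_set]; exact hi)]
      exact List.getElem_set_self (by rw [List.length_set]; omega)
    rw [hv, List.set_set]

lemma pv_foldl_step_getD {α : Type} (ms : List Int) (hnd : ms.Nodup)
    (g : List α → Int → List α) (F : Int → α → α) (d0 : α)
    (hg : ∀ (acc : List α) (x : Int), x ∈ ms → 0 ≤ x → x < (acc.length : Int) →
        g acc x = PySem.List.pySetD acc x (F x (PySem.List.pyGetD acc x d0))) :
    ∀ (r0 : List α), (∀ x ∈ ms, 0 ≤ x ∧ x < (r0.length : Int)) →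
    (ms.foldl g r0).length = r0.length ∧ ∀ j : Nat, j < r0.length →
      (ms.foldl g r0).getD j d0
        = if (j : Int) ∈ ms then F (j : Int) (r0.getD j d0) else r0.getD j d0 := by
  induction ms with
  | nil =>
    intro r0 _
    simp
  | cons x ms ih =>
    intro r0 hms
    have hx := hms x (List.mem_cons_self ..)
    have hgx := hg r0 x (List.mem_cons_self ..) hx.1 hx.2
    have hlen : (PySem.List.pySetD r0 x (F x (PySem.List.pyGetD r0 x d0))).length = r0.length := by
      rw [PySem.List.length_pySetD]
    simp only [List.foldl_cons, hgx]
    have hnd' : ms.Nodup := (List.nodup_cons.mp hnd).2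
    have hxnot : x ∉ ms := (List.nodup_cons.mp hnd).1
    obtain ⟨ihlen, ihval⟩ := ih hnd' (fun acc y hy => hg acc y (List.mem_cons_of_mem _ hy))
      (PySem.List.pySetD r0 x (F x (PySem.List.pyGetD r0 x d0)))
      (fun y hy => by rw [hlen]; exact hms y (List.mem_cons_of_mem _ hy))
    refine ⟨by rw [ihlen, hlen], ?_⟩
    intro j hj
    rw [ihval j (by rw [hlen]; exact hj)]
    have hset : (PySem.List.pySetD r0 x (F x (PySem.List.pyGetD r0 x d0))).getD j d0
        = if (j : Int) = x then F x (r0.getD j d0) else r0.getD j d0 := by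
      rw [PySem.List.pySetD_of_nonneg _ _ hx.1, PySem.List.pyGetD_eq_getElem _ _ hx.1 hx.2,
          List.getD_eq_getElem?_getD, List.getElem?_set]
      by_cases hcase : (j : Int) = x
      · have h1 : x.toNat = j := by omega
        have h2 : x.toNat < r0.length := by omega
        rw [if_pos h1, if_pos (h1 ▸ h2), if_pos hcase, Option.getD_some,
            List.getD_eq_getElem _ _ hj]
        simp only [h1]
      · have h1 : x.toNat ≠ j := by omega
        rw [if_neg h1, if_neg hcase, List.getD_eq_getElem?_getD]
    rw [hset]
    have hmc : ((j : Int) ∈ x :: ms) ↔ ((j : Int) = x ∨ (j : Int) ∈ ms) := List.mem_cons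
    by_cases hjx : (j : Int) = x
    · have hjm : ¬ ((j : Int) ∈ ms) := by rw [hjx]; exact hxnot
      rw [if_neg hjm, if_pos hjx, if_pos (hmc.mpr (Or.inl hjx)), hjx]
    · rw [if_neg hjx]
      by_cases hj_in : (j : Int) ∈ ms
      · rw [if_pos hj_in, if_pos (hmc.mpr (Or.inr hj_in))]
      · rw [if_neg hj_in, if_neg (by rw [hmc]; tauto)]

lemma pv_foldl_congr_len {α β : Type} (l : List β) (f g : List α → β → List α) (len : Nat)
    (hg_len : ∀ (acc : List α) (x : β), acc.length = len → (g acc x).length = len)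
    (h : ∀ (acc : List α) (x : β), x ∈ l → acc.length = len → f acc x = g acc x) :
    ∀ (acc : List α), acc.length = len → l.foldl f acc = l.foldl g acc := by
  induction l with
  | nil => intro acc _; rfl
  | cons x l ih =>
    intro acc hacc
    simp only [List.foldl_cons]
    rw [h acc x (List.mem_cons_self ..) hacc]
    exact ih (fun a y hy => h a y (List.mem_cons_of_mem _ hy)) _ (hg_len acc x hacc)

-- ---- the bound G dominates all thresholds ----
lemma pv_G_bounds (md : Int) (p10 : List Int) :
    1 ≤ pvGdef md p10 ∧
    ∀ L ∈ PySem.List.pyRange 1 (md+1) 1, pvLT p10 L ≤ pvGdef md p10 ∧ pvHT p10 L ≤ pvGdef md p10 := by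
  have hstep : pvGdef md p10 = (PySem.List.pyRange 1 (md+1) 1).foldl
      (fun g L => max g (max (pvLT p10 L) (pvHT p10 L))) 1 := by
    unfold pvGdef
    apply PySem.List.foldl_congr_mem
    intro acc x _
    simp only [pvLT, pvHT]
    split_ifs <;> omega
  obtain ⟨h1, h2⟩ := PySem.List.le_foldl_max_int (PySem.List.pyRange 1 (md+1) 1)
    (fun L => max (pvLT p10 L) (pvHT p10 L)) 1
  rw [hstep]
  refine ⟨h1, fun L hL => ?_⟩
  have := h2 L hL
  constructor <;> omega

-- ---- the two top-level cases ----
lemma pv_main_neg (md mk : Int) (p10 : List Int) (h : md ≤ 0) :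
    build_k_bounds_py md mk p10 = build_k_bounds_py_alt md mk p10 := by
  have hnil : PySem.List.pyRange 1 (md+1) 1 = [] := PySem.List.pyRange_one_eq_nil (by omega)
  simp only [build_k_bounds_py, build_k_bounds_py_alt, hnil, List.foldl_nil]
  refine Prod.ext ?_ ?_
  · apply List.map_congr_left
    intro L hL
    have := PySem.List.mem_pyRange_one.mp hL
    have hL0 : L = 0 := by omega
    rw [hL0, if_pos rfl]
  · apply List.map_congr_left
    intro L hL
    have := PySem.List.mem_pyRange_one.mp hL
    have hL0 : L = 0 := by omega
    rw [hL0, if_pos rfl]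

lemma pv_main_pos (md mk : Int) (p10 : List Int) (hmd : 1 ≤ md)
    (hlen : md + 1 ≤ (p10.length : Int)) :
    build_k_bounds_py md mk p10 = build_k_bounds_py_alt md mk p10 := by
  have hN : (((md+1).toNat : Int)) = md + 1 := Int.toNat_of_nonneg (by omega)
  have hrep0 : (PySem.List.pyRepeat ([0] : List Int) (md + 1)).length = (md+1).toNat := by
    rw [PySem.List.pyRepeat_singleton, List.length_replicate]
  obtain ⟨hlowlen, hlowval⟩ := pv_foldl_step_getD (PySem.List.pyRange 1 (md+1) 1)
    (PySem.List.nodup_pyRange_one 1 (md+1))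
    (fun acc L => PySem.List.pySetD acc L (PySem.List.pyGetD p10 (L-1) 0 - 1))
    (fun L _ => PySem.List.pyGetD p10 (L-1) 0 - 1) 0
    (fun acc x _ _ _ => rfl)
    (PySem.List.pyRepeat [0] (md+1))
    (fun x hx => by
      rw [hrep0]
      have := PySem.List.mem_pyRange_one.mp hx
      omega)
  obtain ⟨hhighlen, hhighval⟩ := pv_foldl_step_getD (PySem.List.pyRange 1 (md+1) 1)
    (PySem.List.nodup_pyRange_one 1 (md+1))
    (fun acc L => PySem.List.pySetD acc L (PySem.List.pyGetD p10 L 0))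
    (fun L _ => PySem.List.pyGetD p10 L 0) 0
    (fun acc x _ _ _ => rfl)
    (PySem.List.pyRepeat [0] (md+1))
    (fun x hx => by
      rw [hrep0]
      have := PySem.List.mem_pyRange_one.mp hx
      omega)
  have hgetlow : ∀ L : Int, L ∈ PySem.List.pyRange 1 (md+1) 1 →
      PySem.List.pyGetD (List.foldl (fun a L => PySem.List.pySetD a L (PySem.List.pyGetD p10 (L - 1) 0 - 1)) (PySem.List.pyRepeat [0] (md + 1)) (PySem.List.pyRange 1 (md + 1))) L 0 = PySem.List.pyGetD p10 (L-1) 0 - 1 := by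
    intro L hL
    obtain ⟨h1, h2⟩ := PySem.List.mem_pyRange_one.mp hL
    have hLc : ((L.toNat : Nat) : Int) = L := by omega
    rw [PySem.List.pyGetD_eq_getElem _ _ (by omega) (by rw [hlowlen, hrep0]; omega)]
    rw [← List.getD_eq_getElem _ 0 (by rw [hlowlen, hrep0]; omega)]
    rw [hlowval L.toNat (by rw [hrep0]; omega), hLc, if_pos hL]
  have hgethigh : ∀ L : Int, L ∈ PySem.List.pyRange 1 (md+1) 1 →
      PySem.List.pyGetD (List.foldl (fun a L => PySem.List.pySetD a L (PySem.List.pyGetD p10 L 0)) (PySem.List.pyRepeat [0] (md + 1)) (PySem.List.pyRange 1 (md + 1))) L 0 = PySem.List.pyGetD p10 L 0 := by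
    intro L hL
    obtain ⟨h1, h2⟩ := PySem.List.mem_pyRange_one.mp hL
    have hLc : ((L.toNat : Nat) : Int) = L := by omega
    rw [PySem.List.pyGetD_eq_getElem _ _ (by omega) (by rw [hhighlen, hrep0]; omega)]
    rw [← List.getD_eq_getElem _ 0 (by rw [hhighlen, hrep0]; omega)]
    rw [hhighval L.toNat (by rw [hrep0]; omega), hLc, if_pos hL]
  -- normalize A to a pair of independent folds
  conv_lhs => simp only [build_k_bounds_py]
  rw [PySem.List.foldl_prod_mk
    (f := fun a (L : Int) => PySem.List.pySetD a L (PySem.List.pyGetD p10 (L-1) 0 - 1))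
    (g := fun a (L : Int) => PySem.List.pySetD a L (PySem.List.pyGetD p10 L 0))]
  have hstep_eq :
      List.foldl
        (fun s L =>
        List.foldl
          (fun s m =>
            (PySem.List.pySetD s.1 L
                (PySem.List.pySetD (PySem.List.pyGetD s.1 L []) m
                  (pvAKlow L
                    (PySem.List.pyGetD
                      ((List.foldl (fun a L => PySem.List.pySetD a L (PySem.List.pyGetD p10 (L - 1) 0 - 1)) (PySem.List.pyRepeat [0] (md + 1)) (PySem.List.pyRange 1 (md + 1))), (List.foldl (fun a L => PySem.List.pySetD a L (PySem.List.pyGetD p10 L 0)) (PySem.List.pyRepeat [0] (md + 1)) (PySem.List.pyRange 1 (md + 1)))).1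
                      L 0)
                    mk m mk.toNat m 1)),
              List.foldl
                (fun kh c =>
                  PySem.List.pySetD kh L
                    (PySem.List.pySetD (PySem.List.pyGetD kh L []) m
                      (PySem.List.pySetD (PySem.List.pyGetD (PySem.List.pyGetD kh L []) m []) c
                        (pvABest c
                          (PySem.List.pyGetD
                            ((List.foldl (fun a L => PySem.List.pySetD a L (PySem.List.pyGetD p10 (L - 1) 0 - 1)) (PySem.List.pyRepeat [0] (md + 1)) (PySem.List.pyRange 1 (md + 1))), (List.foldl (fun a L => PySem.List.pySetD a L (PySem.List.pyGetD p10 L 0)) (PySem.List.pyRepeat [0] (md + 1)) (PySem.List.pyRange 1 (md + 1)))).2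
                            L 0)
                          mk m mk.toNat m 1 0))))
                s.2 (PySem.List.pyRange 1 (L + 1))))
          s (PySem.List.pyRange 2 10))
        (List.map (fun _ => PySem.List.pyRepeat [mk + 1] 10) (PySem.List.pyRange 0 (md + 1)), List.map (fun _ => List.map (fun _ => PySem.List.pyRepeat [0] (md + 1)) (PySem.List.pyRange 0 10)) (PySem.List.pyRange 0 (md + 1))) (PySem.List.pyRange 1 (md + 1))
      = List.foldl
        (fun (s : List (List Int) × List (List (List Int))) (L : Int) =>
        (List.foldl (fun a m => PySem.List.pySetD a L (PySem.List.pySetD (PySem.List.pyGetD a L []) m (pvAKlow L (PySem.List.pyGetD p10 (L - 1) 0 - 1) mk m mk.toNat m 1))) s.1 (PySem.List.pyRange 2 10),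
         List.foldl (fun b m => List.foldl (fun kh c => PySem.List.pySetD kh L (PySem.List.pySetD (PySem.List.pyGetD kh L []) m (PySem.List.pySetD (PySem.List.pyGetD (PySem.List.pyGetD kh L []) m []) c (pvABest c (PySem.List.pyGetD p10 L 0) mk m mk.toNat m 1 0)))) b (PySem.List.pyRange 1 (L + 1))) s.2 (PySem.List.pyRange 2 10)))
        (List.map (fun _ => PySem.List.pyRepeat [mk + 1] 10) (PySem.List.pyRange 0 (md + 1)), List.map (fun _ => List.map (fun _ => PySem.List.pyRepeat [0] (md + 1)) (PySem.List.pyRange 0 10)) (PySem.List.pyRange 0 (md + 1))) (PySem.List.pyRange 1 (md + 1)) := by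
    apply PySem.List.foldl_congr_mem
    intro acc L hL
    dsimp only
    rw [hgetlow L hL, hgethigh L hL]
    exact PySem.List.foldl_prod_mk (fun a m => PySem.List.pySetD a L (PySem.List.pySetD (PySem.List.pyGetD a L []) m (pvAKlow L (PySem.List.pyGetD p10 (L - 1) 0 - 1) mk m mk.toNat m 1))) (fun b m => List.foldl (fun kh c => PySem.List.pySetD kh L (PySem.List.pySetD (PySem.List.pyGetD kh L []) m (PySem.List.pySetD (PySem.List.pyGetD (PySem.List.pyGetD kh L []) m []) c (pvABest c (PySem.List.pyGetD p10 L 0) mk m mk.toNat m 1 0)))) b (PySem.List.pyRange 1 (L + 1))) (PySem.List.pyRange 2 10) acc.1 acc.2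
  rw [hstep_eq]
  rw [PySem.List.foldl_prod_mk
    (f := fun a (L : Int) => List.foldl (fun a m => PySem.List.pySetD a L (PySem.List.pySetD (PySem.List.pyGetD a L []) m (pvAKlow L (PySem.List.pyGetD p10 (L - 1) 0 - 1) mk m mk.toNat m 1))) a (PySem.List.pyRange 2 10))
    (g := fun b (L : Int) => List.foldl (fun b m => List.foldl (fun kh c => PySem.List.pySetD kh L (PySem.List.pySetD (PySem.List.pyGetD kh L []) m (PySem.List.pySetD (PySem.List.pyGetD (PySem.List.pyGetD kh L []) m []) c (pvABest c (PySem.List.pyGetD p10 L 0) mk m mk.toNat m 1 0)))) b (PySem.List.pyRange 1 (L + 1))) b (PySem.List.pyRange 2 10))]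
  -- normalize B
  conv_rhs => simp only [build_k_bounds_py_alt]
  -- global facts about B's bound G and ladder list
  have hGb := pv_G_bounds md p10
  simp only [pvGdef, pvLT, pvHT] at hGb
  have hpws : ∀ m : Int, 2 ≤ m → m < 10 →
      PySem.List.pyGetD (List.map (fun m => pvBPw mk (List.foldl (fun g L => if PySem.List.pyGetD p10 L 0 > (if PySem.List.pyGetD p10 (L - 1) 0 - 1 > g then PySem.List.pyGetD p10 (L - 1) 0 - 1 else g) then PySem.List.pyGetD p10 L 0 else (if PySem.List.pyGetD p10 (L - 1) 0 - 1 > g then PySem.List.pyGetD p10 (L - 1) 0 - 1 else g)) 1 (PySem.List.pyRange 1 (md + 1))) m mk.toNat m 1 []) (PySem.List.pyRange 2 10)) (m-2) []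
        = pvBPw mk (List.foldl (fun g L => if PySem.List.pyGetD p10 L 0 > (if PySem.List.pyGetD p10 (L - 1) 0 - 1 > g then PySem.List.pyGetD p10 (L - 1) 0 - 1 else g) then PySem.List.pyGetD p10 L 0 else (if PySem.List.pyGetD p10 (L - 1) 0 - 1 > g then PySem.List.pyGetD p10 (L - 1) 0 - 1 else g)) 1 (PySem.List.pyRange 1 (md + 1))) m mk.toNat m 1 [] := by
    intro m hm2 hm10
    rw [PySem.List.pyGetD_eq_getElem _ _ (by omega)
      (by rw [List.length_map, PySem.List.length_pyRange_one]; omega)]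
    rw [List.getElem_map, PySem.List.getElem_pyRange_one]
    rw [show ((2:Int) + ((m - 2).toNat : Int)) = m from by omega]
  refine Prod.ext ?_ ?_
  · -- k_low component
    obtain ⟨hklen, hkval⟩ := pv_foldl_step_getD (PySem.List.pyRange 1 (md+1) 1)
      (PySem.List.nodup_pyRange_one 1 (md+1))
      (fun a L => List.foldl (fun a m => PySem.List.pySetD a L (PySem.List.pySetD (PySem.List.pyGetD a L []) m (pvAKlow L (PySem.List.pyGetD p10 (L - 1) 0 - 1) mk m mk.toNat m 1))) a (PySem.List.pyRange 2 10))
      (fun L row => List.foldl (fun r m => PySem.List.pySetD r m (pvAKlow L (PySem.List.pyGetD p10 (L - 1) 0 - 1) mk m mk.toNat m 1)) row (PySem.List.pyRange 2 10))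
      ([] : List Int)
      (fun acc x _ hx0 hxlt => pv_foldl_setD_at x hx0 (PySem.List.pyRange 2 10)
        (fun m r => PySem.List.pySetD r m (pvAKlow x (PySem.List.pyGetD p10 (x - 1) 0 - 1) mk m mk.toNat m 1)) [] acc hxlt)
      (List.map (fun _ => PySem.List.pyRepeat [mk + 1] 10) (PySem.List.pyRange 0 (md + 1)))
      (fun x hx => by
        rw [List.length_map, PySem.List.length_pyRange_one]
        have := PySem.List.mem_pyRange_one.mp hx
        omega)
    apply List.ext_getElem
    · rw [hklen]
      simp [PySem.List.length_pyRange_one]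
    · intro i hi1 hi2
      have hiN : i < (md+1).toNat := by
        rw [hklen, List.length_map, PySem.List.length_pyRange_one] at hi1
        omega
      rw [← List.getD_eq_getElem _ ([] : List Int) hi1,
          hkval i (by rw [List.length_map, PySem.List.length_pyRange_one]; omega)]
      rw [List.getElem_map, PySem.List.getElem_pyRange_one, zero_add]
      have hrow0 : (List.map (fun _ => PySem.List.pyRepeat [mk + 1] 10) (PySem.List.pyRange 0 (md + 1))).getD i ([] : List Int)
          = PySem.List.pyRepeat [mk + 1] 10 := by
        rw [List.getD_eq_getElem _ _ (by rw [List.length_map, PySem.List.length_pyRange_one]; omega),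
            List.getElem_map]
      by_cases hi0 : i = 0
      · subst hi0
        rw [if_neg (by rw [PySem.List.mem_pyRange_one]; simp), if_pos (by simp), hrow0]
      · have hi1' : 1 ≤ i := by omega
        rw [if_pos (by rw [PySem.List.mem_pyRange_one]; omega),
            if_neg (by simp; omega), hrow0]
        -- row level
        obtain ⟨hrlen, hrval⟩ := pv_foldl_step_getD (PySem.List.pyRange 2 10 1)
          (PySem.List.nodup_pyRange_one 2 10)
          (fun r m => PySem.List.pySetD r m (pvAKlow (i : Int) (PySem.List.pyGetD p10 ((i : Int) - 1) 0 - 1) mk m mk.toNat m 1))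
          (fun m _ => pvAKlow (i : Int) (PySem.List.pyGetD p10 ((i : Int) - 1) 0 - 1) mk m mk.toNat m 1) 0
          (fun acc x _ _ _ => rfl)
          (PySem.List.pyRepeat [mk + 1] 10)
          (fun x hx => by
            rw [PySem.List.pyRepeat_singleton, List.length_replicate]
            have := PySem.List.mem_pyRange_one.mp hx
            omega)
        apply List.ext_getElem
        · rw [hrlen, PySem.List.pyRepeat_singleton, List.length_replicate]
          simp [PySem.List.length_pyRange_one]
        · intro j hj1 hj2
          have hj10 : j < 10 := by
            rw [hrlen, PySem.List.pyRepeat_singleton, List.length_replicate] at hj1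
            omega
          rw [← List.getD_eq_getElem _ (0 : Int) hj1,
              hrval j (by rw [PySem.List.pyRepeat_singleton, List.length_replicate]; omega)]
          by_cases hjlt : j < 2
          · rw [if_neg (by rw [PySem.List.mem_pyRange_one]; omega)]
            rw [PySem.List.pyRepeat_singleton, List.getD_replicate _ (by omega)]
            rw [List.getElem_append_left (by simp; omega)]
            interval_cases j <;> rfl
          · have hj2' : 2 ≤ j := by omega
            rw [if_pos (by rw [PySem.List.mem_pyRange_one]; omega)]
            rw [List.getElem_append_right (by simp; omega)]
            rw [List.getElem_map, PySem.List.getElem_pyRange_one]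
            rw [show (2 : Int) + ((j - List.length [mk + 1, mk + 1] : Nat) : Int) = (j : Int) from by
              simp; omega]
            rw [hpws (j : Int) (by omega) (by omega)]
            exact pv_cell_low (i : Int) _ mk _ (j : Int) (by omega) (by omega)
              ((hGb.2 (i : Int) (by rw [PySem.List.mem_pyRange_one]; omega)).1)
  · -- k_high component
    obtain ⟨hklen, hkval⟩ := pv_foldl_step_getD (PySem.List.pyRange 1 (md+1) 1)
      (PySem.List.nodup_pyRange_one 1 (md+1))
      (fun b L => List.foldl (fun b m => List.foldl (fun kh c => PySem.List.pySetD kh L (PySem.List.pySetD (PySem.List.pyGetD kh L []) m (PySem.List.pySetD (PySem.List.pyGetD (PySem.List.pyGetD kh L []) m []) c (pvABest c (PySem.List.pyGetD p10 L 0) mk m mk.toNat m 1 0)))) b (PySem.List.pyRange 1 (L + 1))) b (PySem.List.pyRange 2 10))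
      (fun (L : Int) (plane : List (List Int)) => List.foldl (fun r m => List.foldl (fun r' c => PySem.List.pySetD r' m (PySem.List.pySetD (PySem.List.pyGetD r' m []) c (pvABest c (PySem.List.pyGetD p10 L 0) mk m mk.toNat m 1 0))) r (PySem.List.pyRange 1 (L + 1))) plane (PySem.List.pyRange 2 10))
      ([] : List (List Int))
      (fun acc L _ hx0 hxlt => by
        have h1 := pv_foldl_congr_len (PySem.List.pyRange 2 10)
          (fun b m => List.foldl (fun kh c => PySem.List.pySetD kh L (PySem.List.pySetD (PySem.List.pyGetD kh L []) m (PySem.List.pySetD (PySem.List.pyGetD (PySem.List.pyGetD kh L []) m []) c (pvABest c (PySem.List.pyGetD p10 L 0) mk m mk.toNat m 1 0)))) b (PySem.List.pyRange 1 (L + 1)))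
          (fun b m => PySem.List.pySetD b L
            ((PySem.List.pyRange 1 (L + 1)).foldl
              (fun r' c => PySem.List.pySetD r' m (PySem.List.pySetD (PySem.List.pyGetD r' m []) c (pvABest c (PySem.List.pyGetD p10 L 0) mk m mk.toNat m 1 0)))
              (PySem.List.pyGetD b L [])))
          acc.length
          (fun a m ha => by rw [PySem.List.length_pySetD]; exact ha)
          (fun a m _ ha => pv_foldl_setD_at L hx0 (PySem.List.pyRange 1 (L + 1))
            (fun c plane => PySem.List.pySetD plane m (PySem.List.pySetD (PySem.List.pyGetD plane m []) c (pvABest c (PySem.List.pyGetD p10 L 0) mk m mk.toNat m 1 0)))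
            [] a (by rw [ha]; exact hxlt))
          acc rfl
        dsimp only
        rw [h1]
        exact pv_foldl_setD_at L hx0 (PySem.List.pyRange 2 10)
          (fun m plane => (PySem.List.pyRange 1 (L + 1)).foldl
            (fun r' c => PySem.List.pySetD r' m (PySem.List.pySetD (PySem.List.pyGetD r' m []) c (pvABest c (PySem.List.pyGetD p10 L 0) mk m mk.toNat m 1 0)))
            plane)
          [] acc hxlt)
      (List.map (fun _ => List.map (fun _ => PySem.List.pyRepeat [0] (md + 1)) (PySem.List.pyRange 0 10)) (PySem.List.pyRange 0 (md + 1)))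
      (fun x hx => by
        rw [List.length_map, PySem.List.length_pyRange_one]
        have := PySem.List.mem_pyRange_one.mp hx
        omega)
    apply List.ext_getElem
    · rw [hklen]
      simp [PySem.List.length_pyRange_one]
    · intro i hi1 hi2
      have hiN : i < (md+1).toNat := by
        rw [hklen, List.length_map, PySem.List.length_pyRange_one] at hi1
        omega
      rw [← List.getD_eq_getElem _ ([] : List (List Int)) hi1,
          hkval i (by rw [List.length_map, PySem.List.length_pyRange_one]; omega)]
      rw [List.getElem_map, PySem.List.getElem_pyRange_one, zero_add]
      have hplane0 : (List.map (fun _ => List.map (fun _ => PySem.List.pyRepeat [0] (md + 1)) (PySem.List.pyRange 0 10)) (PySem.List.pyRange 0 (md + 1))).getD i ([] : List (List Int))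
          = List.map (fun _ => PySem.List.pyRepeat [0] (md + 1)) (PySem.List.pyRange 0 10) := by
        rw [List.getD_eq_getElem _ _ (by rw [List.length_map, PySem.List.length_pyRange_one]; omega),
            List.getElem_map]
      by_cases hi0 : i = 0
      · subst hi0
        rw [if_neg (by rw [PySem.List.mem_pyRange_one]; simp), if_pos (by simp), hplane0]
      · have hi1' : 1 ≤ i := by omega
        rw [if_pos (by rw [PySem.List.mem_pyRange_one]; omega),
            if_neg (by simp; omega), hplane0]
        -- plane level
        obtain ⟨hplen, hpval⟩ := pv_foldl_step_getD (PySem.List.pyRange 2 10 1)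
          (PySem.List.nodup_pyRange_one 2 10)
          (fun r m => List.foldl (fun r' c => PySem.List.pySetD r' m (PySem.List.pySetD (PySem.List.pyGetD r' m []) c (pvABest c (PySem.List.pyGetD p10 (i : Int) 0) mk m mk.toNat m 1 0))) r (PySem.List.pyRange 1 ((i : Int) + 1)))
          (fun m row => List.foldl (fun r' c => PySem.List.pySetD r' c (pvABest c (PySem.List.pyGetD p10 (i : Int) 0) mk m mk.toNat m 1 0)) row (PySem.List.pyRange 1 ((i : Int) + 1)))
          ([] : List Int)
          (fun acc m _ hm0 hmlt => pv_foldl_setD_at m hm0 (PySem.List.pyRange 1 ((i : Int) + 1))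
            (fun c row => PySem.List.pySetD row c (pvABest c (PySem.List.pyGetD p10 (i : Int) 0) mk m mk.toNat m 1 0)) [] acc hmlt)
          (List.map (fun _ => PySem.List.pyRepeat [0] (md + 1)) (PySem.List.pyRange 0 10))
          (fun x hx => by
            rw [List.length_map, PySem.List.length_pyRange_one]
            have := PySem.List.mem_pyRange_one.mp hx
            omega)
        apply List.ext_getElem
        · rw [hplen]
          simp [PySem.List.length_pyRange_one, PySem.List.pyRepeat_singleton]
        · intro j hj1 hj2
          have hj10 : j < 10 := by
            rw [hplen, List.length_map, PySem.List.length_pyRange_one] at hj1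
            omega
          rw [← List.getD_eq_getElem _ ([] : List Int) hj1,
              hpval j (by rw [List.length_map, PySem.List.length_pyRange_one]; omega)]
          have hrow0 : (List.map (fun _ => PySem.List.pyRepeat [0] (md + 1)) (PySem.List.pyRange 0 10)).getD j ([] : List Int)
              = PySem.List.pyRepeat [0] (md + 1) := by
            rw [List.getD_eq_getElem _ _ (by rw [List.length_map, PySem.List.length_pyRange_one]; omega),
                List.getElem_map]
          by_cases hjlt : j < 2
          · rw [if_neg (by rw [PySem.List.mem_pyRange_one]; omega), hrow0]
            rw [List.getElem_append_left (by rw [PySem.List.pyRepeat_singleton, List.length_replicate]; omega)]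
            simp only [PySem.List.pyRepeat_singleton]
            have hj01 : j = 0 ∨ j = 1 := by omega
            rcases hj01 with rfl | rfl <;> rfl
          · have hj2' : 2 ≤ j := by omega
            rw [if_pos (by rw [PySem.List.mem_pyRange_one]; omega), hrow0]
            rw [List.getElem_append_right (by rw [PySem.List.pyRepeat_singleton, List.length_replicate]; omega)]
            rw [List.getElem_map, PySem.List.getElem_pyRange_one]
            rw [show (2 : Int) + ((j - (PySem.List.pyRepeat [PySem.List.pyRepeat [(0:Int)] (md + 1)] 2).length : Nat) : Int) = (j : Int) from by
              rw [PySem.List.pyRepeat_singleton, List.length_replicate]; simp; omega]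
            -- row level
            obtain ⟨hclen, hcval⟩ := pv_foldl_step_getD (PySem.List.pyRange 1 ((i : Int) + 1) 1)
              (PySem.List.nodup_pyRange_one 1 ((i : Int) + 1))
              (fun r' c => PySem.List.pySetD r' c (pvABest c (PySem.List.pyGetD p10 (i : Int) 0) mk (j : Int) mk.toNat (j : Int) 1 0))
              (fun c _ => pvABest c (PySem.List.pyGetD p10 (i : Int) 0) mk (j : Int) mk.toNat (j : Int) 1 0) 0
              (fun acc x _ _ _ => rfl)
              (PySem.List.pyRepeat [0] (md + 1))
              (fun x hx => by
                rw [hrep0]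
                have := PySem.List.mem_pyRange_one.mp hx
                omega)
            apply List.ext_getElem
            · rw [hclen, hrep0]
              simp [PySem.List.length_pyRange_one, PySem.List.pyRepeat_singleton]
              omega
            · intro c hc1 hc2
              have hcN : c < (md+1).toNat := by
                rw [hclen, hrep0] at hc1
                omega
              rw [← List.getD_eq_getElem _ (0 : Int) hc1,
                  hcval c (by rw [hrep0]; omega)]
              by_cases hc0 : c = 0
              · subst hc0
                rw [if_neg (by rw [PySem.List.mem_pyRange_one]; simp)]
                rw [PySem.List.pyRepeat_singleton, List.getD_replicate _ (by omega)]
                rw [List.getElem_append_left (by simp [PySem.List.length_pyRange_one])]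
                rw [List.getElem_append_left (by simp)]
                rfl
              · by_cases hci : (c : Int) ≤ (i : Int)
                · rw [if_pos (by rw [PySem.List.mem_pyRange_one]; omega)]
                  rw [List.getElem_append_left (by simp [PySem.List.length_pyRange_one]; omega)]
                  rw [List.getElem_append_right (by simp; omega)]
                  rw [List.getElem_map, PySem.List.getElem_pyRange_one]
                  rw [show (1 : Int) + ((c - List.length [(0 : Int)] : Nat) : Int) = (c : Int) from by
                    simp; omega]
                  rw [hpws (j : Int) (by omega) (by omega)]
                  exact pv_cell_high (c : Int) _ mk _ (j : Int) (by omega) (by omega)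
                    ((hGb.2 (i : Int) (by rw [PySem.List.mem_pyRange_one]; omega)).2)
                · rw [if_neg (by rw [PySem.List.mem_pyRange_one]; omega)]
                  rw [PySem.List.pyRepeat_singleton, List.getD_replicate _ (by omega)]
                  rw [List.getElem_append_right (by simp [PySem.List.length_pyRange_one]; omega)]
                  simp only [PySem.List.pyRepeat_singleton]
                  rw [List.getElem_replicate]

-- ===== VERDICT (by name: the statement is the Claim_ definition above) =====
theorem build_k_bounds_py_spec : Claim_equal_build_k_bounds_py := by
  intro md mk p10 _hdom hpre
  unfold Spec_build_k_bounds_py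
  by_cases h : 1 ≤ md
  · exact pv_main_pos md mk p10 h (hpre h)
  · exact pv_main_neg md mk p10 (by omega)
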